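-- pv_equiv track=rewrite | github.com/marcoagnolon/shift_scheduler | app.py | render_calendar_for_worker
-- ===== SOURCE A (Python) =====
-- def render_calendar_for_worker(schedule, day_names, shift_names, shop_names, worker_names):
--     """
--     Detailed worker timetable:
--     - Each row is a worker–shop combination.
--     - Columns are days.
--     - In each cell, if a worker is assigned to a shop on that day, display a pill (colored by shift name).
--     """
--     html = ['<table class="calendar-table">']
--     # Header row.
--     header = '<tr><th class="calendar-header">Worker - Shop</th>'
--     for day in day_names:
--         header += f'<th class="calendar-header">{day}</th>'
--     header += '</tr>'
--     html.append(header)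
--
--     for worker in worker_names:
--         for shop in shop_names:
--             row = f'<tr><td class="worker-name-cell">{worker} - {shop}</td>'
--             for day in day_names:
--                 cell_html = ""
--                 for s in shift_names:
--                     assigned = schedule.get(shop, {}).get(day, {}).get(s, [])
--                     if worker in assigned:
--                         css_class = "morning-pill" if s.lower() == "morning" else "afternoon-pill" if s.lower() == "afternoon" else "shift-pill"
--                         cell_html += f'<div class="shift-pill {css_class}">{s}</div>'
--                 row += f'<td>{cell_html}</td>'
--             row += '</tr>'
--             html.append(row)
--     html.append('</table>')
--     return "\n".join(html)
-- ===== SOURCE B (Python) =====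
-- def render_calendar_for_worker(schedule, day_names, shift_names, shop_names, worker_names):
--     """
--     Same timetable as A, but the per-cell scan over all shift_names is replaced
--     by an index built once: for each (shop, day) a worker -> pills-html map,
--     so each table cell is a single dictionary lookup.
--     """
--     cells = {}
--     for shop in shop_names:
--         day_map = schedule.get(shop, {})
--         for day in day_names:
--             shift_map = day_map.get(day, {})
--             m = {}
--             for s in shift_names:
--                 low = s.lower()
--                 css_class = "morning-pill" if low == "morning" else "afternoon-pill" if low == "afternoon" else "shift-pill"
--                 pill = f'<div class="shift-pill {css_class}">{s}</div>'
--                 for w in dict.fromkeys(shift_map.get(s, [])):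
--                     m[w] = m.get(w, "") + pill
--             cells[(shop, day)] = m
--     html = ['<table class="calendar-table">']
--     header = '<tr><th class="calendar-header">Worker - Shop</th>'
--     for day in day_names:
--         header += f'<th class="calendar-header">{day}</th>'
--     header += '</tr>'
--     html.append(header)
--     for worker in worker_names:
--         for shop in shop_names:
--             row = f'<tr><td class="worker-name-cell">{worker} - {shop}</td>'
--             for day in day_names:
--                 row += f'<td>{cells.get((shop, day), {}).get(worker, "")}</td>'
--             row += '</tr>'
--             html.append(row)
--     html.append('</table>')
--     return "\n".join(html)
-- ===== Notes on version B (the rewrite author's own statement) =====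
-- stated objective: faster
-- what changed: Instead of scanning every shift name with a membership test inside each worker-shop-day cell, B makes one pass over shop/day/shift assignments to build a (shop, day) -> {worker: pills-html} index (deduplicating workers within an assigned list), and then each cell is a single dictionary lookup.
import Mathlib
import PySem

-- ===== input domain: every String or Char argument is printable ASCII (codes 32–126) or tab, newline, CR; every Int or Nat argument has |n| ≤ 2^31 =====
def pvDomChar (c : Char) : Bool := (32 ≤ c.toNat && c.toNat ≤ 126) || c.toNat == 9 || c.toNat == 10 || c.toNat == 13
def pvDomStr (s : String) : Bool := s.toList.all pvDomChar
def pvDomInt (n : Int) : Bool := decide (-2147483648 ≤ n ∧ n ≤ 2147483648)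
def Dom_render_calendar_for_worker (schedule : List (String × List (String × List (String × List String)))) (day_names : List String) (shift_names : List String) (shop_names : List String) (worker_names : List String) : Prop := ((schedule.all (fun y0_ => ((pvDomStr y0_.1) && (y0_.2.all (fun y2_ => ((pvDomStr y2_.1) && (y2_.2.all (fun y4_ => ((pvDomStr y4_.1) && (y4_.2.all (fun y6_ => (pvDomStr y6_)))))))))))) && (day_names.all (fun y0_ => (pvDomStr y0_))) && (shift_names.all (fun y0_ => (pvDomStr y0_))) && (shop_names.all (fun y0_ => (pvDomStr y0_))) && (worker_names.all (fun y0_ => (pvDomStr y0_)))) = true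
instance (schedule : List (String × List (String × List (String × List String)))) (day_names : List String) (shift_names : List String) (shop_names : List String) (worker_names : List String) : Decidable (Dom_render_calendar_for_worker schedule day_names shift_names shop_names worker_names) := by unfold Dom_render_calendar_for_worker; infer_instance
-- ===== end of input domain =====

-- B replaces A's per-cell scan over all shift names by a (shop, day) -> worker -> pills index
-- built in one pass over the assignments; same output, measured faster (objective: faster).

-- ===== PORT A =====
def render_calendar_for_worker (schedule : List (String × List (String × List (String × List String)))) (day_names : List String) (shift_names : List String) (shop_names : List String) (worker_names : List String) : String :=
  let html : List String := ["<table class=\"calendar-table\">"]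
  let header := day_names.foldl
    (fun h day => h ++ ("<th class=\"calendar-header\">" ++ day ++ "</th>"))
    "<tr><th class=\"calendar-header\">Worker - Shop</th>"
  let header := header ++ "</tr>"
  let html := html ++ [header]
  let html := worker_names.foldl (fun html worker =>
    shop_names.foldl (fun html shop =>
      let row := "<tr><td class=\"worker-name-cell\">" ++ worker ++ " - " ++ shop ++ "</td>"
      let row := day_names.foldl (fun row day =>
        let cell := shift_names.foldl (fun cell s =>
          let assigned := (PySem.Dict.mk ((PySem.Dict.mk ((PySem.Dict.mk schedule).getD shop [])).getD day [])).getD s []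
          if assigned.contains worker then
            let css := if PySem.Str.lower s == "morning" then "morning-pill"
                       else if PySem.Str.lower s == "afternoon" then "afternoon-pill"
                       else "shift-pill"
            cell ++ ("<div class=\"shift-pill " ++ css ++ "\">" ++ s ++ "</div>")
          else cell) ""
        row ++ ("<td>" ++ cell ++ "</td>")) row
      html ++ [row ++ "</tr>"]) html) html
  let html := html ++ ["</table>"]
  PySem.Str.join "\n" html

-- ===== PORT B =====
def pvB_pill (s : String) : String :=
  let low := PySem.Str.lower s
  let css := if low == "morning" then "morning-pill"
             else if low == "afternoon" then "afternoon-pill"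
             else "shift-pill"
  "<div class=\"shift-pill " ++ css ++ "\">" ++ s ++ "</div>"

-- worker -> pills-html map for one (shop, day) cell column
def pvB_cellMap (shift_names : List String) (shift_map : List (String × List String)) : PySem.Dict String String :=
  shift_names.foldl (fun m s =>
    (PySem.List.dedup ((PySem.Dict.mk shift_map).getD s [])).foldl
      (fun m w => m.insert w (m.getD w "" ++ pvB_pill s)) m) PySem.Dict.empty

def pvB_cells (schedule : List (String × List (String × List (String × List String)))) (day_names : List String) (shift_names : List String) (shop_names : List String) : PySem.Dict (String × String) (PySem.Dict String String) :=
  shop_names.foldl (fun c shop =>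
    let day_map := (PySem.Dict.mk schedule).getD shop []
    day_names.foldl (fun c day =>
      c.insert (shop, day) (pvB_cellMap shift_names ((PySem.Dict.mk day_map).getD day []))) c) PySem.Dict.empty

def render_calendar_for_worker_alt (schedule : List (String × List (String × List (String × List String)))) (day_names : List String) (shift_names : List String) (shop_names : List String) (worker_names : List String) : String :=
  let cells := pvB_cells schedule day_names shift_names shop_names
  let html : List String := ["<table class=\"calendar-table\">"]
  let header := day_names.foldl
    (fun h day => h ++ ("<th class=\"calendar-header\">" ++ day ++ "</th>"))
    "<tr><th class=\"calendar-header\">Worker - Shop</th>"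
  let header := header ++ "</tr>"
  let html := html ++ [header]
  let html := worker_names.foldl (fun html worker =>
    shop_names.foldl (fun html shop =>
      let row := "<tr><td class=\"worker-name-cell\">" ++ worker ++ " - " ++ shop ++ "</td>"
      let row := day_names.foldl (fun row day =>
        row ++ ("<td>" ++ ((cells.getD (shop, day) PySem.Dict.empty).getD worker "") ++ "</td>")) row
      html ++ [row ++ "</tr>"]) html) html
  let html := html ++ ["</table>"]
  PySem.Str.join "\n" html

-- ===== PRECONDITION & SPEC =====
def Spec_render_calendar_for_worker (schedule : List (String × List (String × List (String × List String)))) (day_names : List String) (shift_names : List String) (shop_names : List String) (worker_names : List String) (out : String) : Prop := out = render_calendar_for_worker_alt schedule day_names shift_names shop_names worker_names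
instance (schedule : List (String × List (String × List (String × List String)))) (day_names : List String) (shift_names : List String) (shop_names : List String) (worker_names : List String) (out : String) : Decidable (Spec_render_calendar_for_worker schedule day_names shift_names shop_names worker_names out) := by unfold Spec_render_calendar_for_worker; infer_instance

-- ===== CLAIM (what is proved, stated in full; the proofs are below) =====
def Claim_equal_render_calendar_for_worker : Prop := ∀ (schedule : List (String × List (String × List (String × List String)))) (day_names : List String) (shift_names : List String) (shop_names : List String) (worker_names : List String), Dom_render_calendar_for_worker schedule day_names shift_names shop_names worker_names → Spec_render_calendar_for_worker schedule day_names shift_names shop_names worker_names (render_calendar_for_worker schedule day_names shift_names shop_names worker_names)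

-- ===== LEMMAS AND PROOFS =====

-- effect, on one worker's entry, of the inner loop over a deduplicated assigned list
theorem pvL1 (ws : List String) (hnd : ws.Nodup) (m : PySem.Dict String String) (w p : String) :
    (ws.foldl (fun m w' => m.insert w' (m.getD w' "" ++ p)) m).getD w ""
      = if w ∈ ws then m.getD w "" ++ p else m.getD w "" := by
  induction ws generalizing m with
  | nil => simp
  | cons a t ih =>
    rcases List.nodup_cons.mp hnd with ⟨ha, hnt⟩
    rw [List.foldl_cons, ih hnt, PySem.Dict.getD_insert]
    by_cases hwt : w ∈ t
    · have hwa : w ≠ a := fun h => ha (h ▸ hwt)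
      rw [if_pos hwt, if_neg hwa, if_pos (List.mem_cons_of_mem _ hwt)]
    · rw [if_neg hwt]
      by_cases hwa : w = a
      · subst hwa
        rw [if_pos rfl, if_pos (List.mem_cons_self)]
      · rw [if_neg hwa, if_neg (by simp [List.mem_cons, hwa, hwt])]

-- one worker's entry of the cell map equals A's per-cell fold over the shift names
theorem pvL2 (sns : List String) (sm : List (String × List String)) (m : PySem.Dict String String) (w : String) :
    (sns.foldl (fun m s =>
        (PySem.List.dedup ((PySem.Dict.mk sm).getD s [])).foldl
          (fun m w' => m.insert w' (m.getD w' "" ++ pvB_pill s)) m) m).getD w ""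
      = sns.foldl (fun cell s =>
          if ((PySem.Dict.mk sm).getD s []).contains w then cell ++ pvB_pill s else cell)
          (m.getD w "") := by
  induction sns generalizing m with
  | nil => rfl
  | cons s t ih =>
    simp only [List.foldl_cons, ih]
    congr 1
    rw [pvL1 _ (PySem.List.nodup_dedup _)]
    by_cases hw : w ∈ (PySem.Dict.mk sm).getD s []
    · simp [hw]
    · simp [hw]

-- lookup in the (shop, day)-indexed cells dictionary
theorem pvL3 (schedule : List (String × List (String × List (String × List String)))) (day_names shift_names : List String) (shops : List String) (c : PySem.Dict (String × String) (PySem.Dict String String)) (sh dy : String) :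
    ((shops.foldl (fun c shop =>
        day_names.foldl (fun c day =>
          c.insert (shop, day) (pvB_cellMap shift_names ((PySem.Dict.mk ((PySem.Dict.mk schedule).getD shop [])).getD day []))) c) c).getD (sh, dy) PySem.Dict.empty)
      = if sh ∈ shops ∧ dy ∈ day_names
        then pvB_cellMap shift_names ((PySem.Dict.mk ((PySem.Dict.mk schedule).getD sh [])).getD dy [])
        else c.getD (sh, dy) PySem.Dict.empty := by
  induction shops generalizing c with
  | nil => simp
  | cons a t ih =>
    have hinner : ∀ (days : List String) (c : PySem.Dict (String × String) (PySem.Dict String String)),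
        ((days.foldl (fun c day =>
            c.insert (a, day) (pvB_cellMap shift_names ((PySem.Dict.mk ((PySem.Dict.mk schedule).getD a [])).getD day []))) c).getD (sh, dy) PySem.Dict.empty)
          = if sh = a ∧ dy ∈ days
            then pvB_cellMap shift_names ((PySem.Dict.mk ((PySem.Dict.mk schedule).getD sh [])).getD dy [])
            else c.getD (sh, dy) PySem.Dict.empty := by
        intro days
        induction days with
        | nil => simp
        | cons d dt ihd =>
          intro c
          rw [List.foldl_cons, ihd, PySem.Dict.getD_insert]
          by_cases hsa : sh = a
          · subst hsa
            by_cases hdd : dy = d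
            · subst hdd
              simp [List.mem_cons]
            · simp [List.mem_cons, hdd, Prod.ext_iff]
          · simp [hsa, Prod.ext_iff]
    rw [List.foldl_cons, ih, hinner]
    simp only [List.mem_cons]
    split_ifs <;> first | rfl | tauto

-- the cell lookup in B equals A's per-cell fold
theorem pvLcell (schedule : List (String × List (String × List (String × List String)))) (day_names shift_names shop_names : List String) (shop day worker : String) (hsh : shop ∈ shop_names) (hdy : day ∈ day_names) :
    (((pvB_cells schedule day_names shift_names shop_names).getD (shop, day) PySem.Dict.empty).getD worker "")
      = shift_names.foldl (fun cell s =>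
          if ((PySem.Dict.mk ((PySem.Dict.mk ((PySem.Dict.mk schedule).getD shop [])).getD day [])).getD s []).contains worker
          then cell ++ pvB_pill s else cell) "" := by
  unfold pvB_cells
  rw [pvL3, if_pos ⟨hsh, hdy⟩]
  unfold pvB_cellMap
  rw [pvL2]
  simp [PySem.Dict.getD_empty]

-- ===== VERDICT (by name: the statement is the Claim_ definition above) =====
theorem render_calendar_for_worker_spec : Claim_equal_render_calendar_for_worker := by
  intro schedule day_names shift_names shop_names worker_names _
  unfold Spec_render_calendar_for_worker render_calendar_for_worker render_calendar_for_worker_alt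
  apply congrArg (PySem.Str.join "\n")
  apply congrArg (fun l => l ++ ["</table>"])
  apply PySem.List.foldl_congr_mem
  intro html worker _
  apply PySem.List.foldl_congr_mem
  intro html2 shop hshop
  simp only []
  have hrow : ∀ (r : String),
      day_names.foldl (fun row day =>
        let cell := shift_names.foldl (fun cell s =>
          let assigned := (PySem.Dict.mk ((PySem.Dict.mk ((PySem.Dict.mk schedule).getD shop [])).getD day [])).getD s []
          if assigned.contains worker then
            let css := if PySem.Str.lower s == "morning" then "morning-pill"
                       else if PySem.Str.lower s == "afternoon" then "afternoon-pill"
                       else "shift-pill"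
            cell ++ ("<div class=\"shift-pill " ++ css ++ "\">" ++ s ++ "</div>")
          else cell) ""
        row ++ ("<td>" ++ cell ++ "</td>")) r
      = day_names.foldl (fun row day =>
        row ++ ("<td>" ++ (((pvB_cells schedule day_names shift_names shop_names).getD (shop, day) PySem.Dict.empty).getD worker "") ++ "</td>")) r := by
    intro r
    apply PySem.List.foldl_congr_mem
    intro row day hday
    rw [pvLcell schedule day_names shift_names shop_names shop day worker hshop hday]
    simp only [pvB_pill]
  rw [hrow]
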